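-- pv_equiv track=rewrite | github.com/feludwig/pgsql2osm | pgsql2osm/pgsql2osm.py | split_tags_out
-- ===== SOURCE A (Python) =====
-- import typing
--
-- def split_tags_out(row_dict:dict,keep_keys:typing.Collection[str])->typing.Collection[dict] :
--     ''' Given a row_dict, it also contains tags from the database columns.
--     Separate the row_dict into row_dict with known keys, and tags with all
--     other keys.
--     '''
--     dest_dict={}
--     tags={}
--     for k,v in row_dict.items() :
--         if k in keep_keys :
--             dest_dict[k]=v
--         else :
--             tags[k]=v
--     return (dest_dict,tags,)
-- ===== SOURCE B (Python) =====
-- def split_tags_out(row_dict, keep_keys):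
--     ''' Given a row_dict, it also contains tags from the database columns.
--     Separate the row_dict into row_dict with known keys, and tags with all
--     other keys.
--     '''
--     # tags = a copy of the row with the keep keys deleted (loop over keep_keys,
--     # not over the row); dest = the row entries whose key is no longer in tags.
--     tags = dict(row_dict)
--     for k in keep_keys:
--         tags.pop(k, None)
--     dest_dict = {k: v for k, v in row_dict.items() if k not in tags}
--     return (dest_dict, tags)
-- ===== Notes on version B (the rewrite author's own statement) =====
-- stated objective: faster
-- what changed: A partitions in one loop over the row with a linear 'k in keep_keys' test per entry; B instead copies the row dict and deletes the keep keys by looping over keep_keys (tags), then recovers dest as the row entries whose key no longer appears in tags (an O(1) dict membership).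
import Mathlib
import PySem

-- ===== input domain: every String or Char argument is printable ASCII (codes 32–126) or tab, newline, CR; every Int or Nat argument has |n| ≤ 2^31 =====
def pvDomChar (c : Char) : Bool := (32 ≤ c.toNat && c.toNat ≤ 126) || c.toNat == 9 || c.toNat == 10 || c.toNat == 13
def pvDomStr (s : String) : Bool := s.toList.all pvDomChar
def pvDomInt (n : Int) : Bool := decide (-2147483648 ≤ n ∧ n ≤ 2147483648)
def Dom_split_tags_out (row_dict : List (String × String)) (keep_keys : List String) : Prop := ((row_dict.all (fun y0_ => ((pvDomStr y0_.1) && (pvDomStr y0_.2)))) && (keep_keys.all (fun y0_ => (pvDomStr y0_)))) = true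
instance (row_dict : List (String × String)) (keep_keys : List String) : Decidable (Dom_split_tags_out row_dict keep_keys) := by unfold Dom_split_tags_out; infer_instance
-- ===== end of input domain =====

-- B replaces A's single branching loop (linear 'k in keep_keys' test per row) by subtraction:
-- tags is a copy of the row with the keep keys deleted (one pass over keep_keys), and dest is
-- the row entries whose key was deleted from tags.

-- ===== PORT A =====
-- one loop over row_dict.items(); 'k in keep_keys' on the collection; insert into one of two dicts
def split_tags_out (row_dict : List (String × String)) (keep_keys : List String) : (List (String × String)) × (List (String × String)) :=
  let acc := row_dict.foldl
    (fun (acc : PySem.Dict String String × PySem.Dict String String) kv =>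
      if keep_keys.contains kv.1 then (acc.1.insert kv.1 kv.2, acc.2)
      else (acc.1, acc.2.insert kv.1 kv.2))
    (PySem.Dict.empty, PySem.Dict.empty)
  (acc.1.items, acc.2.items)

-- ===== PORT B =====
-- tags = dict(row_dict); for k in keep_keys: tags.pop(k, None);
-- dest_dict = {k: v for k, v in row_dict.items() if k not in tags}
def split_tags_out_alt (row_dict : List (String × String)) (keep_keys : List String) : (List (String × String)) × (List (String × String)) :=
  let tags := keep_keys.foldl (fun (d : PySem.Dict String String) k => d.erase k)
    ((PySem.Dict.empty : PySem.Dict String String).update row_dict)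
  let dest := row_dict.foldl
    (fun (d : PySem.Dict String String) kv =>
      if tags.contains kv.1 then d else d.insert kv.1 kv.2)
    PySem.Dict.empty
  (dest.items, tags.items)

-- ===== PRECONDITION & SPEC =====
def Spec_split_tags_out (row_dict : List (String × String)) (keep_keys : List String) (out : (List (String × String)) × (List (String × String))) : Prop := out = split_tags_out_alt row_dict keep_keys
instance (row_dict : List (String × String)) (keep_keys : List String) (out : (List (String × String)) × (List (String × String))) : Decidable (Spec_split_tags_out row_dict keep_keys out) := by unfold Spec_split_tags_out; infer_instance

-- ===== CLAIM (what is proved, stated in full; the proofs are below) =====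
def Claim_equal_split_tags_out : Prop := ∀ (row_dict : List (String × String)) (keep_keys : List String), Dom_split_tags_out row_dict keep_keys → Spec_split_tags_out row_dict keep_keys (split_tags_out row_dict keep_keys)

-- ===== LEMMAS AND PROOFS =====

-- A's single branching loop equals the pair of insert-folds over the two filtered sublists.
theorem pv_split_loop (p : String × String → Bool) (rd : List (String × String))
    (d t : PySem.Dict String String) :
    rd.foldl
      (fun (acc : PySem.Dict String String × PySem.Dict String String) kv =>
        if p kv then (acc.1.insert kv.1 kv.2, acc.2)
        else (acc.1, acc.2.insert kv.1 kv.2)) (d, t)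
    = ((rd.filter p).foldl (fun d kv => d.insert kv.1 kv.2) d,
       (rd.filter (fun kv => !p kv)).foldl (fun d kv => d.insert kv.1 kv.2) t) := by
  induction rd generalizing d t with
  | nil => rfl
  | cons kv rest ih =>
    by_cases h : p kv = true <;> simp [List.foldl, List.filter, h, ih]

-- the overwrite-map of an insert at the erased key vanishes under the erase filter
theorem pv_filter_map_self (k : String) (v : String) (items : List (String × String)) :
    List.filter (fun p => !(p.1 == k))
      (items.map (fun p => if p.1 == k then (k, v) else p))
    = List.filter (fun p => !(p.1 == k)) items := by
  induction items with
  | nil => rfl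
  | cons q qs ih =>
    cases hq : (q.1 == k) with
    | true => simp only [List.map_cons, List.filter_cons, hq, if_true, Bool.not_true,
        BEq.rfl, if_false, ih, Bool.false_eq_true]
    | false => simp only [List.map_cons, List.filter_cons, hq, if_false, Bool.not_false,
        if_true, ih, Bool.false_eq_true]

-- the overwrite-map of an insert at another key commutes with the erase filter
theorem pv_filter_map_ne (x k : String) (v : String) (h : x ≠ k)
    (items : List (String × String)) :
    List.filter (fun p => !(p.1 == k))
      (items.map (fun p => if p.1 == x then (x, v) else p))
    = (List.filter (fun p => !(p.1 == k)) items).map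
        (fun p => if p.1 == x then (x, v) else p) := by
  induction items with
  | nil => rfl
  | cons q qs ih =>
    have hxk : (x == k) = false := by simpa using h
    cases hq : (q.1 == x) with
    | true =>
      have hqk : (q.1 == k) = false := by
        have : q.1 = x := by simpa using hq
        simpa [this] using h
      simp only [List.map_cons, List.filter_cons, hq, if_true, hxk, hqk, Bool.not_false,
        ih, List.map_cons]
    | false =>
      cases hqk : (q.1 == k) with
      | true => simp only [List.map_cons, List.filter_cons, hq, if_false, hqk, Bool.not_true,
          ih, Bool.false_eq_true]
      | false => simp only [List.map_cons, List.filter_cons, hq, if_false, hqk, Bool.not_false,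
          if_true, ih, List.map_cons, Bool.false_eq_true]

-- erasing k does not change whether another key x occurs
theorem pv_any_filter (x k : String) (h : x ≠ k) (items : List (String × String)) :
    (List.filter (fun p => !(p.1 == k)) items).any (fun p => p.1 == x)
    = items.any (fun p => p.1 == x) := by
  induction items with
  | nil => rfl
  | cons q qs ih =>
    cases hq : (q.1 == x) with
    | true =>
      have hqk : (q.1 == k) = false := by
        have : q.1 = x := by simpa using hq
        simpa [this] using h
      simp [hqk, hq, ih]
    | false =>
      cases hqk : (q.1 == k) with
      | true => simp [hqk, hq, ih]
      | false => simp [hqk, hq, ih]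

-- erase after insert at the same key = erase alone
theorem pv_erase_insert_self (d : PySem.Dict String String) (k v : String) :
    (d.insert k v).erase k = d.erase k := by
  simp only [PySem.Dict.insert, PySem.Dict.erase]
  split
  · exact congrArg PySem.Dict.mk (pv_filter_map_self k v d.items)
  · simp [List.filter_append]

-- erase and insert at distinct keys commute
theorem pv_erase_insert_ne (d : PySem.Dict String String) (x k v : String) (h : x ≠ k) :
    (d.insert x v).erase k = (d.erase k).insert x v := by
  simp only [PySem.Dict.insert, PySem.Dict.erase, PySem.Dict.contains]
  rw [pv_any_filter x k h d.items]
  split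
  · exact congrArg PySem.Dict.mk (pv_filter_map_ne x k v h d.items)
  · simp [List.filter_append, h]

-- erasing a key from a dict built by an insert-fold = building from the key-filtered list
theorem pv_erase_update (L : List (String × String)) (k : String)
    (d : PySem.Dict String String) :
    (L.foldl (fun (d : PySem.Dict String String) kv => d.insert kv.1 kv.2) d).erase k
    = (L.filter (fun kv => !(kv.1 == k))).foldl
        (fun (d : PySem.Dict String String) kv => d.insert kv.1 kv.2) (d.erase k) := by
  induction L generalizing d with
  | nil => rfl
  | cons kv rest ih =>
    obtain ⟨a, v⟩ := kv
    by_cases h : a = k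
    · subst h
      simp [List.foldl, List.filter, ih, pv_erase_insert_self]
    · have hak : (a == k) = false := by simpa using h
      simp [List.foldl, List.filter, hak, ih, pv_erase_insert_ne d a k v h]

-- the keep_keys pop loop = building the dict from the rows whose key is not a keep key
theorem pv_pop_loop (kk : List String) (L : List (String × String)) :
    kk.foldl (fun (d : PySem.Dict String String) k => d.erase k)
      (L.foldl (fun (d : PySem.Dict String String) kv => d.insert kv.1 kv.2) PySem.Dict.empty)
    = (L.filter (fun kv => !kk.contains kv.1)).foldl
        (fun (d : PySem.Dict String String) kv => d.insert kv.1 kv.2) PySem.Dict.empty := by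
  induction kk generalizing L with
  | nil => simp
  | cons k rest ih =>
    have he : (PySem.Dict.empty : PySem.Dict String String).erase k = PySem.Dict.empty := rfl
    simp only [List.foldl_cons, pv_erase_update, he, ih, List.filter_filter]
    congr 1
    apply List.filter_congr
    intro kv _
    by_cases h1 : kv.1 = k <;> simp [h1]

-- membership in a dict built by an insert-fold from L is membership among L's keys
theorem pv_contains_update (L : List (String × String)) (x : String) :
    ((L.foldl (fun (d : PySem.Dict String String) kv => d.insert kv.1 kv.2)
      PySem.Dict.empty).contains x) = (L.map (·.1)).contains x := by
  have h := PySem.Dict.keys_foldl_insert_key (ν := String) L (·.1) (fun _ kv => kv.2)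
    PySem.Dict.empty
  rw [PySem.Dict.contains_eq_decide_mem_keys, h]
  have hset : PySem.Set.update (PySem.Dict.empty : PySem.Dict String String).keys
      (L.map (·.1)) = PySem.Set.ofList (L.map (·.1)) := rfl
  rw [hset]
  by_cases hx : x ∈ L.map (·.1)
  · simp [hx, (PySem.Set.mem_ofList (L.map (·.1)) x).mpr hx]
  · have hns : x ∉ PySem.Set.ofList (L.map (·.1)) := fun hc =>
      hx ((PySem.Set.mem_ofList (L.map (·.1)) x).mp hc)
    simp [hx, hns]

-- a skip-or-insert loop = the insert-fold over the filtered list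
theorem pv_foldl_if_filter (p : String × String → Bool) (L : List (String × String))
    (d : PySem.Dict String String) :
    L.foldl (fun (d : PySem.Dict String String) kv =>
      if p kv then d.insert kv.1 kv.2 else d) d
    = (L.filter p).foldl (fun (d : PySem.Dict String String) kv => d.insert kv.1 kv.2) d := by
  induction L generalizing d with
  | nil => rfl
  | cons kv rest ih =>
    by_cases h : p kv = true <;> simp [List.foldl, List.filter, h, ih]

-- B's dest loop (skip if the key survived into tags) = the insert-fold over the kept rows
theorem pv_dest_loop (rd : List (String × String)) (kk : List String) :
    rd.foldl
      (fun (d : PySem.Dict String String) kv =>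
        if ((rd.filter (fun kv => !kk.contains kv.1)).foldl
            (fun (d : PySem.Dict String String) kv => d.insert kv.1 kv.2)
            PySem.Dict.empty).contains kv.1 then d else d.insert kv.1 kv.2)
      PySem.Dict.empty
    = (rd.filter (fun kv => kk.contains kv.1)).foldl
        (fun (d : PySem.Dict String String) kv => d.insert kv.1 kv.2) PySem.Dict.empty := by
  have hcong : ∀ (d : PySem.Dict String String), ∀ kv ∈ rd,
      (if ((rd.filter (fun kv => !kk.contains kv.1)).foldl
          (fun (d : PySem.Dict String String) kv => d.insert kv.1 kv.2)
          PySem.Dict.empty).contains kv.1 then d else d.insert kv.1 kv.2)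
      = (if kk.contains kv.1 then d.insert kv.1 kv.2 else d) := by
    intro d kv hkv
    rw [pv_contains_update]
    by_cases hk : kk.contains kv.1 = true
    · have hno : ((rd.filter (fun kv => !kk.contains kv.1)).map (·.1)).contains kv.1 = false := by
        rw [List.contains_eq_any_beq, List.any_eq_false]
        intro y hy
        rw [List.mem_map] at hy
        obtain ⟨q, hq, rfl⟩ := hy
        rw [List.mem_filter] at hq
        intro hbeq
        have hqe : q.1 = kv.1 := (eq_of_beq hbeq).symm
        rw [hqe, hk] at hq
        exact absurd hq.2 (by decide)
      rw [hno, hk]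
      simp
    · have hf : kk.contains kv.1 = false := by simpa using hk
      have hmem : kv.1 ∈ (rd.filter (fun kv => !kk.contains kv.1)).map (·.1) := by
        refine List.mem_map.mpr ⟨kv, ?_, rfl⟩
        have hnm : kv.1 ∉ kk := by
          simp only [← List.contains_iff_mem, hf]; exact Bool.false_ne_true
        exact List.mem_filter.mpr ⟨hkv, by simp [hnm]⟩
      have hyes : ((rd.filter (fun kv => !kk.contains kv.1)).map (·.1)).contains kv.1 = true := by
        rw [List.contains_eq_any_beq, List.any_eq_true]
        exact ⟨kv.1, hmem, by simp⟩
      rw [hyes, hf]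
      simp
  rw [PySem.List.foldl_congr_mem rd _ _ _ hcong,
    pv_foldl_if_filter (fun kv => kk.contains kv.1) rd]

-- ===== VERDICT (by name: the statement is the Claim_ definition above) =====
theorem split_tags_out_spec : Claim_equal_split_tags_out := by
  intro rd kk _
  show _ = _
  simp only [split_tags_out, split_tags_out_alt, PySem.Dict.update,
    pv_split_loop (fun kv => kk.contains kv.1) rd, pv_pop_loop, pv_dest_loop]
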